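-- pv_equiv track=rewrite | github.com/cdaven/kthtimetable | xunittest.py | compareListsByRepresentation
-- ===== SOURCE A (Python) =====
-- def compareListsByRepresentation(list1, list2):
--     nlist1 = []
--     nlist2 = []
--
--     for e in list1:
--         nlist1.append(repr(e))
--     for e in list2:
--         nlist2.append(repr(e))
--
--     for e in nlist1:
--         if e not in nlist2:
--             return False
--
--     return True
-- ===== SOURCE B (Python) =====
-- def compareListsByRepresentation(list1, list2):
--     s1 = sorted(repr(e) for e in list1)
--     s2 = sorted(repr(e) for e in list2)
--     i = 0
--     for r in s1:
--         while i < len(s2) and s2[i] < r: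
--             i += 1
--         if i >= len(s2) or s2[i] != r:
--             return False
--     return True
-- ===== Notes on version B (the rewrite author's own statement) =====
-- stated objective: alternative
-- what changed: Replaces A's per-element membership scan over the repr list with sorting both repr lists and a single two-pointer merge walk that checks every list1-repr against the sorted list2-reprs.
import Mathlib
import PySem

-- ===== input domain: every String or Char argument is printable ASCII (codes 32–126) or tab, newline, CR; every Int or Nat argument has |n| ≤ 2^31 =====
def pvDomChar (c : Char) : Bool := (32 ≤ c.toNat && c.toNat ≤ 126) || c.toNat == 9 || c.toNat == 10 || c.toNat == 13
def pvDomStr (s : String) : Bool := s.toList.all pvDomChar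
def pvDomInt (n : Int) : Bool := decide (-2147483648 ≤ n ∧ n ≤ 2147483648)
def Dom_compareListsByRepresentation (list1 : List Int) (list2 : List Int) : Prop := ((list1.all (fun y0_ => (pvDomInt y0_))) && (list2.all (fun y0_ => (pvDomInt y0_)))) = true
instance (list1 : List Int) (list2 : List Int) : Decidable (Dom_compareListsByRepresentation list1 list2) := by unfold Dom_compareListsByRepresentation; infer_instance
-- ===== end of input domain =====

-- B replaces A's per-element membership scan with sort-both-lists plus a single two-pointer merge walk (alternative algorithm; equal value proved).
-- ===== PORT A =====
-- the final 'for e in nlist1: if e not in nlist2: return False / return True' loop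
def compareA_loop (nlist2 : List String) : List String → Bool
  | [] => true
  | e :: rest => if !(nlist2.contains e) then false else compareA_loop nlist2 rest

def compareListsByRepresentation (list1 : List Int) (list2 : List Int) : Bool :=
  let nlist1 := list1.foldl (fun acc e => acc ++ [PySem.Int.toStr e]) []
  let nlist2 := list2.foldl (fun acc e => acc ++ [PySem.Int.toStr e]) []
  compareA_loop nlist2 nlist1

-- ===== PORT B =====
-- the 'for r in s1: while … i += 1; if …: return False' merge walk, with the
-- index i into s2 represented by the remaining suffix of s2
def bWalk : List String → List String → Bool
  | [], _ => true
  | _ :: _, [] => false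
  | r :: rs, y :: ys =>
    if y < r then bWalk (r :: rs) ys
    else if y = r then bWalk rs (y :: ys)
    else false
termination_by s1 s2 => s1.length + s2.length

def compareListsByRepresentation_alt (list1 : List Int) (list2 : List Int) : Bool :=
  let s1 := PySem.List.sorted (list1.map PySem.Int.toStr) (fun x => x) false
  let s2 := PySem.List.sorted (list2.map PySem.Int.toStr) (fun x => x) false
  bWalk s1 s2

-- ===== PRECONDITION & SPEC =====
def Spec_compareListsByRepresentation (list1 : List Int) (list2 : List Int) (out : Bool) : Prop := out = compareListsByRepresentation_alt list1 list2
instance (list1 : List Int) (list2 : List Int) (out : Bool) : Decidable (Spec_compareListsByRepresentation list1 list2 out) := by unfold Spec_compareListsByRepresentation; infer_instance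

-- ===== CLAIM (what is proved, stated in full; the proofs are below) =====
def Claim_equal_compareListsByRepresentation : Prop := ∀ (list1 : List Int) (list2 : List Int), Dom_compareListsByRepresentation list1 list2 → Spec_compareListsByRepresentation list1 list2 (compareListsByRepresentation list1 list2)

-- ===== LEMMAS AND PROOFS =====
theorem foldl_append_toStr (l : List Int) (acc : List String) :
    l.foldl (fun acc e => acc ++ [PySem.Int.toStr e]) acc = acc ++ l.map PySem.Int.toStr := by
  induction l generalizing acc with
  | nil => simp
  | cons x xs ih => simp [List.foldl, ih]

theorem compareA_loop_eq_all (n2 : List String) (n1 : List String) :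
    compareA_loop n2 n1 = n1.all (fun e => n2.contains e) := by
  induction n1 with
  | nil => rfl
  | cons e rest ih =>
    simp only [compareA_loop, List.all_cons, ih]
    by_cases h : n2.contains e = true
    · rw [h]; rfl
    · rw [Bool.eq_false_iff.mpr h]; rfl

-- the merge walk on sorted lists decides membership of every s1-element in s2
theorem all_congr_mem (l : List String) (p q : String → Bool)
    (h : ∀ x ∈ l, p x = q x) : l.all p = l.all q := by
  induction l with
  | nil => rfl
  | cons x xs ih =>
    simp only [List.all_cons, h x (List.mem_cons_self), ih fun y hy => h y (List.mem_cons_of_mem _ hy)]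

theorem bWalk_eq_all (s1 s2 : List String)
    (h1 : s1.Pairwise (· ≤ ·)) (h2 : s2.Pairwise (· ≤ ·)) :
    bWalk s1 s2 = s1.all (fun r => s2.contains r) := by
  induction s1, s2 using bWalk.induct with
  | case1 s2 => simp [bWalk]
  | case2 r rs => simp [bWalk]
  | case3 r rs y ys hlt ih =>
    rw [bWalk, if_pos hlt, ih h1 h2.tail]
    refine all_congr_mem _ _ _ ?_ |>.symm
    intro e he
    have hre : r ≤ e := by
      rcases List.mem_cons.mp he with rfl | hmem
      · exact le_refl _
      · exact List.rel_of_pairwise_cons h1 hmem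
    have hf : (e == y) = false :=
      beq_eq_false_iff_ne.mpr (fun h => absurd (h ▸ lt_of_lt_of_le hlt hre) (lt_irrefl _))
    rw [List.contains_cons, hf, Bool.false_or]
  | case4 r rs ys hnlt ih =>
    rw [bWalk, if_neg hnlt, if_pos rfl, ih h1.tail h2]
    simp [List.all_cons]
  | case5 r rs y ys hnlt hne =>
    rw [bWalk, if_neg hnlt, if_neg hne]
    have hry : r < y := lt_of_le_of_ne (not_lt.mp hnlt) (fun h => hne h.symm)
    have hc : ((y :: ys).contains r) = false := by
      simp only [List.contains_eq_mem, decide_eq_false_iff_not, List.mem_cons]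
      rintro (rfl | hmem)
      · exact absurd rfl (ne_of_gt hry)
      · exact absurd (lt_of_lt_of_le hry (List.rel_of_pairwise_cons h2 hmem)) (lt_irrefl r)
    rw [List.all_cons, hc, Bool.false_and]

-- ===== VERDICT (by name: the statement is the Claim_ definition above) =====
theorem compareListsByRepresentation_spec : Claim_equal_compareListsByRepresentation := by
  intro list1 list2 _
  unfold Spec_compareListsByRepresentation compareListsByRepresentation compareListsByRepresentation_alt
  simp only [foldl_append_toStr, List.nil_append, compareA_loop_eq_all]
  rw [bWalk_eq_all _ _ (by simpa using PySem.List.sorted_pairwise (list1.map PySem.Int.toStr) (fun x => x))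
        (by simpa using PySem.List.sorted_pairwise (list2.map PySem.Int.toStr) (fun x => x))]
  rw [Bool.eq_iff_iff, List.all_eq_true, List.all_eq_true]
  constructor
  · intro h x hx
    have hx' : x ∈ list1.map PySem.Int.toStr := by
      simpa [PySem.List.mem_sorted] using hx
    simpa [List.contains_eq_mem, PySem.List.mem_sorted] using h x hx'
  · intro h x hx
    have hx' : x ∈ PySem.List.sorted (list1.map PySem.Int.toStr) (fun x => x) false := by
      simpa [PySem.List.mem_sorted] using hx
    simpa [List.contains_eq_mem, PySem.List.mem_sorted] using h x hx'
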